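-- pv_equiv track=rewrite | github.com/yu1uuu/Gomoku | game.py | detect_closeds
-- ===== SOURCE A (Python) =====
-- def is_sq_in_board(board, y, x):
--     if 0 <= y < len(board) and 0 <= x < len(board[0]):
--         return True
--     return False
--
-- def is_bounded(board, y_end, x_end, length, d_y, d_x):
--     open_bool_1 = is_sq_in_board(board, y_end + d_y, x_end + d_x) and board[y_end + d_y][x_end + d_x] == " "
--     open_bool_2 = is_sq_in_board(board, y_end - d_y * length, x_end - d_x * length) and board[y_end - d_y * length][x_end - d_x * length] == " "
--     if open_bool_1 and open_bool_2:
--         return "OPEN"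
--     elif (open_bool_1 and not open_bool_2) or (open_bool_2 and not open_bool_1):
--         return "SEMIOPEN"
--     else:
--         return "CLOSED"
--
-- def detect_closed(board, col, y_start, x_start, length, d_y, d_x):
--     y, x, = y_start, x_start; sequence = length; closed_count = 0
--     while is_sq_in_board(board, y, x):
--         if board[y][x] == col:
--             sequence -= 1
--         else:
--             if sequence == 0:
--                 if is_bounded(board, y - d_y, x - d_x, length, d_y, d_x) == "CLOSED":
--                     closed_count += 1
--             sequence = length
--         y += d_y;
--         x += d_x
--     if sequence == 0:
--         if is_bounded(board, y - d_y, x - d_x, length, d_y, d_x) == "CLOSED":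
--             closed_count += 1
--     return closed_count
--
-- def detect_closeds(board, col, length):
--     closed_count = 0
--     for y in range(len(board)):
--         closed_count += detect_closed(board, col, y, 0, length, 0, 1)   # everything horizontal
--         if y < len(board):
--             closed_count += detect_closed(board, col, y, 0, length, 1, 1)     # half of across down
--         if 0 < y < len(board):
--             closed_count += detect_closed(board, col, y, len(board[0]) - 1, length, 1, -1)   # half of across up
--     for x in range(len(board[0])):
--         closed_count += detect_closed(board, col, 0, x, length, 1, 0)    # everything vertical
--         if 0 < x < len(board[0]):
--             closed_count += detect_closed(board, col, 0, x, length, 1, 1)   # half of across down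
--             closed_count += detect_closed(board, col, 0, x, length, 1, -1)  # half of across up
--     return closed_count
-- ===== SOURCE B (Python) =====
-- def detect_closeds(board, col, length):
--     h, w = len(board), len(board[0])
--
--     def ray(y, x, dy, dx):
--         cells = []
--         while 0 <= y < h and 0 <= x < w:
--             cells.append(board[y][x])
--             y += dy
--             x += dx
--         return cells
--
--     def count_line(cells):
--         total = 0
--         i, n = 0, len(cells)
--         while i < n:
--             if cells[i] != col:
--                 i += 1
--                 continue
--             j = i
--             while j < n and cells[j] == col:
--                 j += 1
--             if (j - i == length
--                     and (i == 0 or cells[i - 1] != " ")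
--                     and (j == n or cells[j] != " ")):
--                 total += 1
--             i = j
--         return total
--
--     total = 0
--     for y in range(h):
--         total += count_line(ray(y, 0, 0, 1))        # rows
--         total += count_line(ray(y, 0, 1, 1))        # \ diagonals from the left edge
--         if y >= 1:
--             total += count_line(ray(y, w - 1, 1, -1))   # / diagonals from the right edge
--     for x in range(w):
--         total += count_line(ray(0, x, 1, 0))        # columns
--         total += count_line(ray(0, x, 1, -1))       # / diagonals from the top row (all of them)
--         if x >= 1:
--             total += count_line(ray(0, x, 1, 1))    # \ diagonals from the top row
--     return total
-- ===== Notes on version B (the rewrite author's own statement) =====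
-- stated objective: alternative
-- what changed: B materializes every board line (rows, columns, both diagonal directions) as a cell list and counts runs by two-pointer segmentation (skip to a col-cell, consume the maximal run at once, test exact length and both neighbour cells with off-board treated as blocked), instead of A's streaming countdown counter that re-probes the board by coordinates through is_bounded; B also enumerates every anti-diagonal, including the single-cell one through (0,0) that A's enumeration skips.
-- intended difference: When length = 1 and the cell (0,0) holds col, A returns one less than B: A's anti-diagonal enumeration starts at (0,x) only for x >= 1 and at (y, w-1) only for y >= 1, so it never scans the single-cell anti-diagonal through (0,0); B enumerates every anti-diagonal and counts that closed one-stone sequence, which is the intended value. — e.g. on detect_closeds([["b"]], "b", 1): A returns 3, B returns 4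
-- outside the precondition, e.g. on detect_closeds([['x', 'x']], 'b', 0): A returns 13, B returns 0
import Mathlib
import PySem

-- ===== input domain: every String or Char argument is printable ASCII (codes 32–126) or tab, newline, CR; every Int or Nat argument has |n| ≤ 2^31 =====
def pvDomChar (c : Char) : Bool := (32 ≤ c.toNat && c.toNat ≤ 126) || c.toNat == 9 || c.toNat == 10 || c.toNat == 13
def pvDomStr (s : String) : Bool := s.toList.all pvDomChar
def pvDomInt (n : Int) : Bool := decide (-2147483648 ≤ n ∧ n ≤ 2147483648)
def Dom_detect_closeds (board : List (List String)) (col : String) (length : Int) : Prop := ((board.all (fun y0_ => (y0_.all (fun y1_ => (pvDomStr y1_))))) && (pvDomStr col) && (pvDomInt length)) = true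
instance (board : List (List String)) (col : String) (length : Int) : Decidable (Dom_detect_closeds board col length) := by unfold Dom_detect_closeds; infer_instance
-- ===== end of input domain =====

-- B rewrites A by materializing each board line and counting exact-length blocked runs by
-- two-pointer segmentation (objective: alternative, same cost); B also counts the single-cell
-- anti-diagonal through (0,0) that A's enumeration skips (see D_detect_closeds below).

-- ===== PORT A =====
-- len(board[0]) (Python raises IndexError on []; Pre_ excludes the empty board)
def pyW (board : List (List String)) : Nat := ((PySem.List.pyGet? board 0).getD []).length

def is_sq_in_board (board : List (List String)) (y x : Int) : Bool :=
  decide (0 ≤ y ∧ y < (board.length : Int) ∧ 0 ≤ x ∧ x < ((pyW board : Nat) : Int))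

-- board[y][x]; in A every access is guarded by is_sq_in_board, so the defaults are never used
def cellA (board : List (List String)) (y x : Int) : String :=
  (PySem.List.pyGet? ((PySem.List.pyGet? board y).getD []) x).getD ""

def is_bounded (board : List (List String)) (y_end x_end length d_y d_x : Int) : String :=
  let open_bool_1 := is_sq_in_board board (y_end + d_y) (x_end + d_x) &&
    (cellA board (y_end + d_y) (x_end + d_x) == " ")
  let open_bool_2 := is_sq_in_board board (y_end - d_y * length) (x_end - d_x * length) &&
    (cellA board (y_end - d_y * length) (x_end - d_x * length) == " ")
  if open_bool_1 && open_bool_2 then "OPEN"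
  else if (open_bool_1 && !open_bool_2) || (open_bool_2 && !open_bool_1) then "SEMIOPEN"
  else "CLOSED"

-- the while-loop of detect_closed; fuel only guards termination (any direction is allowed in
-- Python); returns the final (y, x, sequence, closed_count)
def detect_closed_loop (board : List (List String)) (col : String) (length d_y d_x : Int) :
    Nat → Int → Int → Int → Int → Int × Int × Int × Int
  | 0, y, x, s, c => (y, x, s, c)
  | fuel + 1, y, x, s, c =>
    if is_sq_in_board board y x then
      if cellA board y x == col then
        detect_closed_loop board col length d_y d_x fuel (y + d_y) (x + d_x) (s - 1) c
      else
        detect_closed_loop board col length d_y d_x fuel (y + d_y) (x + d_x) length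
          (if s == 0 && (is_bounded board (y - d_y) (x - d_x) length d_y d_x == "CLOSED")
           then c + 1 else c)
    else (y, x, s, c)

def detect_closed (board : List (List String)) (col : String)
    (y_start x_start length d_y d_x : Int) : Int :=
  let r := detect_closed_loop board col length d_y d_x (board.length + pyW board + 1)
    y_start x_start length 0
  if r.2.2.1 == 0 && (is_bounded board (r.1 - d_y) (r.2.1 - d_x) length d_y d_x == "CLOSED")
  then r.2.2.2 + 1 else r.2.2.2

def detect_closeds (board : List (List String)) (col : String) (length : Int) : Int :=
  let cc1 := (PySem.List.pyRange 0 (board.length : Int) 1).foldl (fun acc y =>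
    let a1 := acc + detect_closed board col y 0 length 0 1
    let a2 := if y < (board.length : Int) then a1 + detect_closed board col y 0 length 1 1 else a1
    if 0 < y ∧ y < (board.length : Int) then
      a2 + detect_closed board col y (((pyW board : Nat) : Int) - 1) length 1 (-1)
    else a2) 0
  (PySem.List.pyRange 0 ((pyW board : Nat) : Int) 1).foldl (fun acc x =>
    let a1 := acc + detect_closed board col 0 x length 1 0
    if 0 < x ∧ x < ((pyW board : Nat) : Int) then
      a1 + detect_closed board col 0 x length 1 1 + detect_closed board col 0 x length 1 (-1)
    else a1) cc1

-- ===== PORT B =====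
-- board[y][x] (always used with 0 ≤ y < h, 0 ≤ x < w, so defaults are never used)
def cellB (board : List (List String)) (y x : Int) : String :=
  (PySem.List.pyGet? ((PySem.List.pyGet? board y).getD []) x).getD ""

-- materialize the cells of one line, walking from (y, x) in direction (dy, dx)
def rayB (board : List (List String)) (h w dy dx : Int) : Nat → Int → Int → List String
  | 0, _, _ => []
  | fuel + 1, y, x =>
    if 0 ≤ y ∧ y < h ∧ 0 ≤ x ∧ x < w then
      cellB board y x :: rayB board h w dy dx fuel (y + dy) (x + dx)
    else []

-- two-pointer run segmentation: skip non-col cells (remembering the previous cell), then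
-- consume a maximal run of col at once and test exact length and both blocked neighbours
def countLineGo (col : String) (length : Int) : Nat → Option String → List String → Int
  | 0, _, _ => 0
  | _, _, [] => 0
  | fuel + 1, prev, c :: rest =>
    if c == col then
      let run := (c :: rest).takeWhile (fun t => t == col)
      let rest' := (c :: rest).dropWhile (fun t => t == col)
      let okBefore := match prev with | none => true | some p => !(p == " ")
      let okAfter := match rest' with | [] => true | q :: _ => !(q == " ")
      (if ((run.length : Int) == length) && okBefore && okAfter then 1 else 0)
        + countLineGo col length fuel (some col) rest'
    else countLineGo col length fuel (some c) rest

def countLine (col : String) (length : Int) (cells : List String) : Int :=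
  countLineGo col length cells.length none cells

def detect_closeds_alt (board : List (List String)) (col : String) (length : Int) : Int :=
  let h := (board.length : Int)
  let w := ((pyW board : Nat) : Int)
  let fuel := board.length + pyW board + 1
  let t1 := (PySem.List.pyRange 0 h 1).foldl (fun acc y =>
    let a1 := acc + countLine col length (rayB board h w 0 1 fuel y 0)
    let a2 := a1 + countLine col length (rayB board h w 1 1 fuel y 0)
    if 1 ≤ y then a2 + countLine col length (rayB board h w 1 (-1) fuel y (w - 1)) else a2) 0
  (PySem.List.pyRange 0 w 1).foldl (fun acc x =>
    let a1 := acc + countLine col length (rayB board h w 1 0 fuel 0 x)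
    let a2 := a1 + countLine col length (rayB board h w 1 (-1) fuel 0 x)
    if 1 ≤ x then a2 + countLine col length (rayB board h w 1 1 fuel 0 x) else a2) t1

-- ===== PRECONDITION & SPEC =====
-- Pre_ excludes the inputs where A raises IndexError (an empty board, or a row shorter than the
-- first row) and the ill-posed corner length = 0, where "a closed sequence of zero stones" has no
-- specified meaning and A and B defensibly return different counts (A counts blocked empty
-- positions, B counts nothing).
def Pre_detect_closeds (board : List (List String)) (col : String) (length : Int) : Prop :=
  board ≠ [] ∧ (∀ row ∈ board, (board.headD []).length ≤ row.length) ∧ length ≠ 0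
instance (board : List (List String)) (col : String) (length : Int) :
    Decidable (Pre_detect_closeds board col length) := by
  unfold Pre_detect_closeds; infer_instance

def pvWitness_detect_closeds : List (List String) × String × Int :=
  ([["b", " "], [" ", "b"]], "b", 2)

-- When length = 1 and the top-left cell holds col, A skips the single-cell anti-diagonal line
-- through (0,0) (it starts anti-diagonals at (0,x) only for x ≥ 1) and returns one less than B,
-- which enumerates every anti-diagonal and counts that closed one-stone sequence as intended.
def D_detect_closeds (board : List (List String)) (col : String) (length : Int) : Prop :=
  length = 1 ∧ (board.head?.bind List.head?) = some col
instance (board : List (List String)) (col : String) (length : Int) :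
    Decidable (D_detect_closeds board col length) := by
  unfold D_detect_closeds; infer_instance

def Spec_detect_closeds (board : List (List String)) (col : String) (length : Int) (out : Int) : Prop :=
  ¬ D_detect_closeds board col length → out = detect_closeds_alt board col length
instance (board : List (List String)) (col : String) (length : Int) (out : Int) :
    Decidable (Spec_detect_closeds board col length out) := by
  unfold Spec_detect_closeds; infer_instance

def pvDiffWitness_detect_closeds : List (List String) × String × Int := ([["b"]], "b", 1)
def pvDiffWitnessOut_detect_closeds : Int × Int := (3, 4)

-- ===== CLAIM (what is proved, stated in full; the proofs are below) =====
def Claim_unchanged_detect_closeds : Prop := ∀ (board : List (List String)) (col : String) (length : Int), Dom_detect_closeds board col length → Pre_detect_closeds board col length → Spec_detect_closeds board col length (detect_closeds board col length)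
def Claim_changed_detect_closeds : Prop := Dom_detect_closeds (pvDiffWitness_detect_closeds.1) (pvDiffWitness_detect_closeds.2.1) (pvDiffWitness_detect_closeds.2.2) ∧ Pre_detect_closeds (pvDiffWitness_detect_closeds.1) (pvDiffWitness_detect_closeds.2.1) (pvDiffWitness_detect_closeds.2.2) ∧ D_detect_closeds (pvDiffWitness_detect_closeds.1) (pvDiffWitness_detect_closeds.2.1) (pvDiffWitness_detect_closeds.2.2) ∧ detect_closeds (pvDiffWitness_detect_closeds.1) (pvDiffWitness_detect_closeds.2.1) (pvDiffWitness_detect_closeds.2.2) = pvDiffWitnessOut_detect_closeds.1 ∧ detect_closeds_alt (pvDiffWitness_detect_closeds.1) (pvDiffWitness_detect_closeds.2.1) (pvDiffWitness_detect_closeds.2.2) = pvDiffWitnessOut_detect_closeds.2 ∧ pvDiffWitnessOut_detect_closeds.1 ≠ pvDiffWitnessOut_detect_closeds.2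
def Claim_exact_detect_closeds : Prop := ∀ (board : List (List String)) (col : String) (length : Int), Dom_detect_closeds board col length → Pre_detect_closeds board col length → D_detect_closeds board col length → detect_closeds board col length ≠ detect_closeds_alt board col length

-- ===== LEMMAS AND PROOFS =====

-- "is_bounded = CLOSED" iff both ends are not open
theorem closedShape (o1 o2 : Bool) :
    ((if o1 && o2 then "OPEN"
      else if (o1 && !o2) || (o2 && !o1) then "SEMIOPEN"
      else ("CLOSED" : String)) == "CLOSED") = (!o1 && !o2) := by
  cases o1 <;> cases o2 <;> rfl

-- blockedAt: the cell at (y, x) is not an open empty square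
def blockedAt (board : List (List String)) (y x : Int) : Bool :=
  !(is_sq_in_board board y x && (cellA board y x == " "))

-- streaming reference scan: pb = the cell before the current run is blocked, run = its length
def sScan (col : String) (length : Int) : Bool → Nat → List String → Int
  | pb, run, [] => if (run : Int) = length ∧ pb = true then 1 else 0
  | pb, run, c :: rest =>
    if c = col then sScan col length pb (run + 1) rest
    else (if (run : Int) = length ∧ pb = true ∧ c ≠ " " then 1 else 0) +
      sScan col length (decide (c ≠ " ")) 0 rest

theorem sScan_takeWhile (col : String) (length : Int) (pb : Bool) :
    ∀ (cells : List String) (run : Nat),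
      sScan col length pb run cells
        = sScan col length pb (run + (cells.takeWhile (fun t => t == col)).length)
            (cells.dropWhile (fun t => t == col)) := by
  intro cells
  induction cells with
  | nil => intro run; simp
  | cons c rest ih =>
    intro run
    by_cases hc : c = col
    · have hb : (c == col) = true := by simp [hc]
      simp only [sScan, if_pos hc, List.takeWhile_cons, List.dropWhile_cons, hb, if_true,
        List.length_cons]
      rw [ih]
      congr 1
      omega
    · have hb : (c == col) = false := by simp [hc]
      simp [List.takeWhile_cons, List.dropWhile_cons, hb]

theorem countLineGo_nil (col : String) (length : Int) (f : Nat) (prev : Option String) :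
    countLineGo col length f prev [] = 0 := by
  cases f <;> rfl

theorem sScan_nil (col : String) (length : Int) (pb : Bool) (run : Nat) :
    sScan col length pb run [] = if (run : Int) = length ∧ pb = true then 1 else 0 := rfl

theorem sScan_cons_ne (col : String) (length : Int) (pb : Bool) (run : Nat)
    (q : String) (rest : List String) (hq : q ≠ col) :
    sScan col length pb run (q :: rest)
      = (if (run : Int) = length ∧ pb = true ∧ q ≠ " " then 1 else 0)
        + sScan col length (decide (q ≠ " ")) 0 rest := by
  simp [sScan, hq]

theorem sScan_cons_ne_zero (col : String) (length : Int) (pb : Bool)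
    (q : String) (rest : List String) (hq : q ≠ col) (hl : length ≠ 0) :
    sScan col length pb 0 (q :: rest) = sScan col length (decide (q ≠ " ")) 0 rest := by
  rw [sScan_cons_ne col length pb 0 q rest hq]
  rw [if_neg (by rintro ⟨h0, _⟩; exact hl h0.symm)]
  omega

theorem countLineGo_eq_sScan (col : String) (length : Int) (hl : length ≠ 0) :
    ∀ (n : Nat) (cells : List String), cells.length ≤ n → ∀ (prev : Option String),
      countLineGo col length n prev cells
        = sScan col length (match prev with | none => true | some p => decide (p ≠ " ")) 0 cells := by
  intro n
  induction n with
  | zero =>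
    intro cells hlen prev
    have : cells = [] := by cases cells <;> simp_all
    subst this
    rw [countLineGo_nil, sScan_nil]
    rw [if_neg (by rintro ⟨h0, _⟩; exact hl h0.symm)]
  | succ n ih =>
    intro cells hlen prev
    match cells with
    | [] =>
      rw [countLineGo_nil, sScan_nil]
      rw [if_neg (by rintro ⟨h0, _⟩; exact hl h0.symm)]
    | c :: rest =>
      by_cases hc : c = col
      · have hb : (c == col) = true := by simp [hc]
        have hdw : (c :: rest).dropWhile (fun t => t == col) = rest.dropWhile (fun t => t == col) := by
          simp [hb]
        have hlen2 : ((c :: rest).dropWhile (fun t => t == col)).length ≤ n := by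
          rw [hdw]
          have := List.length_dropWhile_le (fun t => t == col) rest
          simp only [List.length_cons] at hlen
          omega
        rw [sScan_takeWhile]
        simp only [countLineGo, hb, if_true, Nat.zero_add]
        cases hdwc : (c :: rest).dropWhile (fun t => t == col) with
        | nil =>
          rw [countLineGo_nil, sScan_nil]
          cases prev with
          | none =>
            simp only [beq_iff_eq, Bool.and_true, Bool.true_and, Int.add_zero]
            split_ifs with h1 h2 h2 <;> simp_all
          | some p =>
            simp only [beq_iff_eq, Bool.and_true]
            split_ifs with h1 h2 h2 <;> simp_all
        | cons q rest'' =>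
          have hqne : ¬ q = col := by
            have := List.head?_dropWhile_not (fun t => t == col) (c :: rest)
            rw [hdwc] at this; simpa using this
          have hlenq : (q :: rest'').length ≤ n := by rw [← hdwc]; exact hlen2
          rw [ih (q :: rest'') hlenq (some col)]
          rw [sScan_cons_ne_zero col length _ q rest'' hqne hl]
          rw [sScan_cons_ne col length _ _ q rest'' hqne]
          cases prev with
          | none =>
            simp only [beq_iff_eq]
            split_ifs with h1 h2 h2 <;> simp_all
          | some p =>
            simp only [beq_iff_eq]
            split_ifs with h1 h2 h2 <;> simp_all
      · have hb : (c == col) = false := by simp [hc]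
        simp only [countLineGo, hb, Bool.false_eq_true, if_false]
        rw [ih rest (by simp only [List.length_cons] at hlen; omega) (some c)]
        rw [sScan_cons_ne_zero col length _ c rest hc hl]

-- the trailing check of detect_closed applied to the final loop state
def dcFin (board : List (List String)) (col : String) (length dy dx : Int)
    (fuel : Nat) (y x s cnt : Int) : Int :=
  let r := detect_closed_loop board col length dy dx fuel y x s cnt
  if r.2.2.1 == 0 && (is_bounded board (r.1 - dy) (r.2.1 - dx) length dy dx == "CLOSED")
  then r.2.2.2 + 1 else r.2.2.2

theorem detect_closed_eq_dcFin (board : List (List String)) (col : String)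
    (y x length dy dx : Int) :
    detect_closed board col y x length dy dx
      = dcFin board col length dy dx (board.length + pyW board + 1) y x length 0 := rfl

theorem is_bounded_closed (board : List (List String)) (y_end x_end length dy dx : Int) :
    (is_bounded board y_end x_end length dy dx == "CLOSED")
      = (!(is_sq_in_board board (y_end + dy) (x_end + dx) &&
            (cellA board (y_end + dy) (x_end + dx) == " ")) &&
         !(is_sq_in_board board (y_end - dy * length) (x_end - dx * length) &&
            (cellA board (y_end - dy * length) (x_end - dx * length) == " "))) :=
  closedShape _ _

theorem blockedAt_out (board : List (List String)) (y x : Int)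
    (h : is_sq_in_board board y x = false) : blockedAt board y x = true := by
  simp [blockedAt, h]

theorem dcFin_exit (board : List (List String)) (col : String) (length dy dx : Int)
    (fuel : Nat) (y x s cnt : Int) (h : is_sq_in_board board y x = false) :
    dcFin board col length dy dx fuel y x s cnt
      = if (s == 0) && (is_bounded board (y - dy) (x - dx) length dy dx == "CLOSED")
        then cnt + 1 else cnt := by
  cases fuel <;> simp [dcFin, detect_closed_loop, h]

theorem sScan_cons_col (col : String) (length : Int) (pb : Bool) (run : Nat)
    (c : String) (rest : List String) (hc : c = col) :
    sScan col length pb run (c :: rest) = sScan col length pb (run + 1) rest := by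
  simp [sScan, hc]

-- the post-check value at a non-col cell / at loop exit, as a function of run and pb
theorem check_eq (board : List (List String)) (col : String) (length dy dx : Int)
    (y x cnt : Int) (run : Nat) (pb : Bool) (ba : Bool)
    (hba : ba = blockedAt board y x)
    (hpb : pb = blockedAt board (y - dy * ((run : Int) + 1)) (x - dx * ((run : Int) + 1))) :
    (if ((length - (run : Int)) == 0) &&
        (is_bounded board (y - dy) (x - dx) length dy dx == "CLOSED")
     then cnt + 1 else cnt)
      = cnt + (if (run : Int) = length ∧ pb = true ∧ ba = true then 1 else 0) := by
  rw [is_bounded_closed]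
  have e1 : y - dy + dy = y := by ring
  have e2 : x - dx + dx = x := by ring
  rw [e1, e2]
  by_cases hrl : (run : Int) = length
  · have hb0 : (length - (run : Int) == 0) = true := by simp [hrl]
    have ecoord1 : y - dy - dy * length = y - dy * ((run : Int) + 1) := by rw [← hrl]; ring
    have ecoord2 : x - dx - dx * length = x - dx * ((run : Int) + 1) := by rw [← hrl]; ring
    rw [hb0, ecoord1, ecoord2]
    rw [show (!(is_sq_in_board board (y - dy * ((run:Int) + 1)) (x - dx * ((run:Int) + 1)) &&
      (cellA board (y - dy * ((run:Int) + 1)) (x - dx * ((run:Int) + 1)) == " "))) = pb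
      from by rw [hpb]; rfl]
    rw [show (!(is_sq_in_board board y x && (cellA board y x == " "))) = ba
      from by rw [hba]; rfl]
    cases pb <;> cases ba <;> simp [hrl]
  · have hb0 : (length - (run : Int) == 0) = false := by
      simp only [beq_eq_false_iff_ne, ne_eq, sub_eq_zero]
      intro hx; exact hrl hx.symm
    rw [hb0]
    simp [hrl]

-- at an in-board cell, blockedAt is just "the cell is not blank"
theorem blockedAt_in (board : List (List String)) (y x : Int)
    (h : is_sq_in_board board y x = true) :
    blockedAt board y x = !(cellA board y x == " ") := by
  simp [blockedAt, h]

-- the core simulation: A's while-loop (plus its trailing check) computes, over the ray that B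
-- materializes, exactly the streaming scan; mval is a termination measure for direction (dy,dx)
theorem dc_loop_eq (board : List (List String)) (col : String) (length dy dx : Int)
    (mval : Int → Int → Int)
    (hm : ∀ y x, is_sq_in_board board y x = true →
          mval (y + dy) (x + dx) < mval y x ∧ 0 < mval y x) :
    ∀ (fuel : Nat) (y x : Int) (run : Nat) (cnt : Int) (pb : Bool),
      mval y x ≤ (fuel : Int) →
      pb = blockedAt board (y - dy * ((run : Int) + 1)) (x - dx * ((run : Int) + 1)) →
      dcFin board col length dy dx fuel y x (length - (run : Int)) cnt
      = cnt + sScan col length pb run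
          (rayB board (board.length : Int) ((pyW board : Nat) : Int) dy dx fuel y x) := by
  intro fuel
  induction fuel with
  | zero =>
    intro y x run cnt pb hf hpb
    have hnin : is_sq_in_board board y x = false := by
      cases hin : is_sq_in_board board y x
      · rfl
      · exact absurd hf (by have := (hm y x hin).2; push_cast; omega)
    rw [dcFin_exit board col length dy dx 0 y x _ cnt hnin]
    simp only [rayB, sScan_nil]
    rw [check_eq board col length dy dx y x cnt run pb true (blockedAt_out board y x hnin).symm hpb]
    simp
  | succ n ihf =>
    intro y x run cnt pb hf hpb
    cases hin : is_sq_in_board board y x with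
    | false =>
      rw [dcFin_exit board col length dy dx (n+1) y x _ cnt hin]
      have hninP : ¬ (0 ≤ y ∧ y < (board.length : Int) ∧ 0 ≤ x ∧ x < ((pyW board : Nat) : Int)) := by
        simpa [is_sq_in_board] using hin
      simp only [rayB, if_neg hninP, sScan_nil]
      rw [check_eq board col length dy dx y x cnt run pb true (blockedAt_out board y x hin).symm hpb]
      simp
    | true =>
      have hf' : mval (y + dy) (x + dx) ≤ (n : Int) := by
        have := (hm y x hin).1; push_cast at hf ⊢; omega
      have hinP : 0 ≤ y ∧ y < (board.length : Int) ∧ 0 ≤ x ∧ x < ((pyW board : Nat) : Int) := by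
        simpa [is_sq_in_board] using hin
      simp only [rayB, if_pos hinP]
      rw [show cellB board y x = cellA board y x from rfl]
      cases hcc : (cellA board y x == col) with
      | true =>
        have hceq : cellA board y x = col := by simpa using hcc
        rw [sScan_cons_col col length pb run (cellA board y x) _ hceq]
        have hstep : dcFin board col length dy dx (n+1) y x (length - (run : Int)) cnt
            = dcFin board col length dy dx n (y + dy) (x + dx) (length - (run : Int) - 1) cnt := by
          simp [dcFin, detect_closed_loop, hin, hcc]
        rw [hstep]
        have hseq : length - (run : Int) - 1 = length - (((run + 1 : Nat) : Int)) := by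
          push_cast; ring
        rw [hseq]
        apply ihf (y + dy) (x + dx) (run + 1) cnt pb hf'
        rw [hpb]
        congr 1 <;> push_cast <;> ring
      | false =>
        have hcne : ¬ cellA board y x = col := by simpa using hcc
        have hpb' : (decide (¬ cellA board y x = " "))
            = blockedAt board ((y + dy) - dy * ((0 : Int) + 1)) ((x + dx) - dx * ((0 : Int) + 1)) := by
          have e1 : (y + dy) - dy * ((0 : Int) + 1) = y := by ring
          have e2 : (x + dx) - dx * ((0 : Int) + 1) = x := by ring
          rw [e1, e2, blockedAt_in board y x hin]
          cases hsp : (cellA board y x == " ") <;> simp_all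
        have hstep : dcFin board col length dy dx (n+1) y x (length - (run : Int)) cnt
            = dcFin board col length dy dx n (y + dy) (x + dx) length
                (if ((length - (run : Int)) == 0) &&
                    (is_bounded board (y - dy) (x - dx) length dy dx == "CLOSED")
                 then cnt + 1 else cnt) := by
          simp [dcFin, detect_closed_loop, hin, hcc]
        rw [hstep]
        have hpb'' : (decide (¬ cellA board y x = " "))
            = blockedAt board ((y + dy) - dy * (((0 : Nat) : Int) + 1))
                ((x + dx) - dx * (((0 : Nat) : Int) + 1)) := by exact_mod_cast hpb'
        have hIH := ihf (y + dy) (x + dx) 0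
          (if ((length - (run : Int)) == 0) &&
              (is_bounded board (y - dy) (x - dx) length dy dx == "CLOSED")
           then cnt + 1 else cnt)
          (decide (¬ cellA board y x = " ")) hf' hpb''
        rw [show length - (((0 : Nat)) : Int) = length from by simp] at hIH
        rw [hIH]
        rw [check_eq board col length dy dx y x cnt run pb (!(cellA board y x == " "))
          (blockedAt_in board y x hin).symm hpb]
        rw [sScan_cons_ne col length pb run (cellA board y x) _ hcne]
        simp only [ne_eq]
        by_cases hend : (run : Int) = length ∧ pb = true ∧ ¬ cellA board y x = " "
        · rw [if_pos ⟨hend.1, hend.2.1, by simpa using hend.2.2⟩, if_pos hend]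
          omega
        · rw [if_neg (by rintro ⟨h1, h2, h3⟩; exact hend ⟨h1, h2, by simpa using h3⟩),
            if_neg hend]
          omega

theorem rayB_out (board : List (List String)) (h w dy dx : Int) (fuel : Nat) (y x : Int)
    (hout : ¬ (0 ≤ y ∧ y < h ∧ 0 ≤ x ∧ x < w)) :
    rayB board h w dy dx fuel y x = [] := by
  cases fuel <;> simp [rayB, hout]

-- the per-call form: one detect_closed call equals countLine of the materialized ray
theorem detect_closed_eq_countLine (board : List (List String)) (col : String)
    (length dy dx y x : Int) (mval : Int → Int → Int)
    (hm : ∀ y x, is_sq_in_board board y x = true →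
          mval (y + dy) (x + dx) < mval y x ∧ 0 < mval y x)
    (hf : mval y x ≤ ((board.length + pyW board + 1 : Nat) : Int))
    (hstart : is_sq_in_board board (y - dy) (x - dx) = false)
    (hl : length ≠ 0) :
    detect_closed board col y x length dy dx
      = countLine col length (rayB board (board.length : Int) ((pyW board : Nat) : Int) dy dx
          (board.length + pyW board + 1) y x) := by
  rw [detect_closed_eq_dcFin]
  have hpb0 : (true : Bool)
      = blockedAt board (y - dy * (((0 : Nat) : Int) + 1)) (x - dx * (((0 : Nat) : Int) + 1)) := by
    have e1 : y - dy * (((0 : Nat) : Int) + 1) = y - dy := by push_cast; ring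
    have e2 : x - dx * (((0 : Nat) : Int) + 1) = x - dx := by push_cast; ring
    rw [e1, e2, blockedAt_out board (y - dy) (x - dx) hstart]
  have hdc := dc_loop_eq board col length dy dx mval hm (board.length + pyW board + 1)
    y x 0 0 true hf hpb0
  rw [show length - (((0 : Nat)) : Int) = length from by simp] at hdc
  rw [hdc]
  rw [countLine, countLineGo_eq_sScan col length hl _ _ le_rfl none]
  simp

theorem foldl_shift (f : Int → Int → Int) : ∀ (l : List Int),
    (∀ acc d x, x ∈ l → f (acc + d) x = f acc x + d) →
    ∀ t d, l.foldl f (t + d) = l.foldl f t + d := by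
  intro l
  induction l with
  | nil => intro _ t d; simp
  | cons x xs ih =>
    intro h t d
    simp only [List.foldl_cons]
    rw [h t d x (by simp)]
    exact ih (fun a d' x' hx' => h a d' x' (by simp [hx'])) (f t x) d

theorem foldl_diff (f g : Int → Int → Int) (e : Int → Int) : ∀ (l : List Int),
    (∀ acc d x, x ∈ l → f (acc + d) x = f acc x + d) →
    (∀ acc x, x ∈ l → g acc x = f acc x + e x) →
    ∀ t, l.foldl g t = l.foldl f t + (l.map e).sum := by
  intro l
  induction l with
  | nil => intro _ _ t; simp
  | cons x xs ih =>
    intro hfsh hg t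
    simp only [List.foldl_cons, List.map_cons, List.sum_cons]
    rw [hg t x (by simp)]
    rw [ih (fun a d' x' hx' => hfsh a d' x' (by simp [hx']))
        (fun a x' hx' => hg a x' (by simp [hx'])) (f t x + e x)]
    rw [foldl_shift f xs (fun a d' x' hx' => hfsh a d' x' (by simp [hx'])) (f t x) (e x)]
    ring

-- the whole-program relation: B = A + (count of the one anti-diagonal line A skips)
theorem alt_eq (board : List (List String)) (col : String) (length : Int) (hl : length ≠ 0) :
    detect_closeds_alt board col length
      = detect_closeds board col length
        + countLine col length (rayB board (board.length : Int) ((pyW board : Nat) : Int) 1 (-1)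
            (board.length + pyW board + 1) 0 0) := by
  have hmv : ∀ dx' : Int, ∀ y x : Int, is_sq_in_board board y x = true →
      (fun (y _ : Int) => (board.length : Int) - y) (y + 1) (x + dx')
        < (fun (y _ : Int) => (board.length : Int) - y) y x
      ∧ 0 < (fun (y _ : Int) => (board.length : Int) - y) y x := by
    intro dx' y x hin
    simp only [is_sq_in_board, decide_eq_true_eq] at hin
    constructor <;> simp <;> omega
  have hmh : ∀ y x : Int, is_sq_in_board board y x = true →
      (fun (_ x : Int) => ((pyW board : Nat) : Int) - x) (y + 0) (x + 1)
        < (fun (_ x : Int) => ((pyW board : Nat) : Int) - x) y x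
      ∧ 0 < (fun (_ x : Int) => ((pyW board : Nat) : Int) - x) y x := by
    intro y x hin
    simp only [is_sq_in_board, decide_eq_true_eq] at hin
    constructor <;> simp <;> omega
  have hrow : ∀ y : Int, detect_closed board col y 0 length 0 1
      = countLine col length (rayB board (board.length : Int) ((pyW board : Nat) : Int) 0 1
          (board.length + pyW board + 1) y 0) := by
    intro y
    exact detect_closed_eq_countLine board col length 0 1 y 0 _ hmh
      (by push_cast; omega) (by simp [is_sq_in_board]) hl
  have hdiagL : ∀ y : Int, 0 ≤ y → detect_closed board col y 0 length 1 1
      = countLine col length (rayB board (board.length : Int) ((pyW board : Nat) : Int) 1 1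
          (board.length + pyW board + 1) y 0) := by
    intro y hy
    exact detect_closed_eq_countLine board col length 1 1 y 0 _ (hmv 1)
      (by push_cast; omega) (by simp [is_sq_in_board]) hl
  have hantiR : ∀ y : Int, 0 ≤ y →
      detect_closed board col y (((pyW board : Nat) : Int) - 1) length 1 (-1)
      = countLine col length (rayB board (board.length : Int) ((pyW board : Nat) : Int) 1 (-1)
          (board.length + pyW board + 1) y (((pyW board : Nat) : Int) - 1)) := by
    intro y hy
    exact detect_closed_eq_countLine board col length 1 (-1) y _ _ (hmv (-1))
      (by push_cast; omega) (by simp [is_sq_in_board] <;> omega) hl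
  have hcol : ∀ x : Int, detect_closed board col 0 x length 1 0
      = countLine col length (rayB board (board.length : Int) ((pyW board : Nat) : Int) 1 0
          (board.length + pyW board + 1) 0 x) := by
    intro x
    exact detect_closed_eq_countLine board col length 1 0 0 x _ (hmv 0)
      (by push_cast; omega) (by simp [is_sq_in_board]) hl
  have hdiagT : ∀ x : Int, detect_closed board col 0 x length 1 1
      = countLine col length (rayB board (board.length : Int) ((pyW board : Nat) : Int) 1 1
          (board.length + pyW board + 1) 0 x) := by
    intro x
    exact detect_closed_eq_countLine board col length 1 1 0 x _ (hmv 1)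
      (by push_cast; omega) (by simp [is_sq_in_board]) hl
  have hantiT : ∀ x : Int, detect_closed board col 0 x length 1 (-1)
      = countLine col length (rayB board (board.length : Int) ((pyW board : Nat) : Int) 1 (-1)
          (board.length + pyW board + 1) 0 x) := by
    intro x
    exact detect_closed_eq_countLine board col length 1 (-1) 0 x _ (hmv (-1))
      (by push_cast; omega) (by simp [is_sq_in_board]) hl
  simp only [detect_closeds, detect_closeds_alt]
  -- the y-folds agree pointwise
  have hyfold :
      (PySem.List.pyRange 0 (board.length : Int) 1).foldl (fun acc y =>
        let a1 := acc + detect_closed board col y 0 length 0 1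
        let a2 := if y < (board.length : Int) then a1 + detect_closed board col y 0 length 1 1 else a1
        if 0 < y ∧ y < (board.length : Int) then
          a2 + detect_closed board col y (((pyW board : Nat) : Int) - 1) length 1 (-1)
        else a2) 0
      = (PySem.List.pyRange 0 (board.length : Int) 1).foldl (fun acc y =>
        let a1 := acc + countLine col length (rayB board (board.length : Int) ((pyW board : Nat) : Int) 0 1 (board.length + pyW board + 1) y 0)
        let a2 := a1 + countLine col length (rayB board (board.length : Int) ((pyW board : Nat) : Int) 1 1 (board.length + pyW board + 1) y 0)
        if 1 ≤ y then a2 + countLine col length (rayB board (board.length : Int) ((pyW board : Nat) : Int) 1 (-1) (board.length + pyW board + 1) y (((pyW board : Nat) : Int) - 1)) else a2) 0 := by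
    apply PySem.List.foldl_congr_mem
    intro acc y hy
    have hy' := (PySem.List.mem_pyRange_one.1 hy)
    simp only
    rw [hrow y, hdiagL y hy'.1, hantiR y hy'.1, if_pos hy'.2,
      if_congr (show (0 < y ∧ y < (board.length : Int)) ↔ 1 ≤ y by constructor <;> intro h <;> [exact h.1; exact ⟨h, hy'.2⟩]) rfl rfl]
  rw [hyfold]
  rw [foldl_diff
    (fun acc x =>
      let a1 := acc + detect_closed board col 0 x length 1 0
      if 0 < x ∧ x < ((pyW board : Nat) : Int) then
        a1 + detect_closed board col 0 x length 1 1 + detect_closed board col 0 x length 1 (-1)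
      else a1)
    (fun acc x =>
      let a1 := acc + countLine col length (rayB board (board.length : Int) ((pyW board : Nat) : Int) 1 0 (board.length + pyW board + 1) 0 x)
      let a2 := a1 + countLine col length (rayB board (board.length : Int) ((pyW board : Nat) : Int) 1 (-1) (board.length + pyW board + 1) 0 x)
      if 1 ≤ x then a2 + countLine col length (rayB board (board.length : Int) ((pyW board : Nat) : Int) 1 1 (board.length + pyW board + 1) 0 x) else a2)
    (fun x => if x = 0 then countLine col length (rayB board (board.length : Int) ((pyW board : Nat) : Int) 1 (-1) (board.length + pyW board + 1) 0 0) else 0)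
    (PySem.List.pyRange 0 ((pyW board : Nat) : Int) 1)
    (by intro acc d x hx; simp only; split_ifs <;> ring)
    (by
      intro acc x hx
      have hx' := PySem.List.mem_pyRange_one.1 hx
      simp only
      rw [hcol x, hdiagT x, hantiT x]
      by_cases h0 : x = 0
      · subst h0
        rw [if_neg (by omega), if_neg (by omega), if_pos rfl]
      · rw [if_pos (by omega), if_pos (by omega), if_neg h0]
        ring)]
  congr 1
  -- the sum of the x = 0 indicator over range(w) is the skipped line's count
  cases hpw : pyW board with
  | zero =>
    rw [PySem.List.pyRange_one_eq_nil (by simp)]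
    rw [show rayB board (board.length : Int) (((0 : Nat)) : Int) 1 (-1)
        (board.length + 0 + 1) 0 0 = [] from rayB_out _ _ _ _ _ _ _ _ (by simp)]
    simp [countLine, countLineGo_nil]
  | succ m =>
    rw [PySem.List.pyRange_one_cons (by push_cast; omega)]
    simp only [List.map_cons, List.sum_cons, if_pos rfl, Int.zero_add]
    rw [List.map_congr_left (g := fun _ => (0 : Int))
      (by intro x hx; have hx' := PySem.List.mem_pyRange_one.1 hx; rw [if_neg (by omega)])]
    simp
-- the value of the skipped line: 1 exactly when length = 1 and the (0,0) cell holds col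
theorem k_val (board : List (List String)) (col : String) (length : Int) :
    countLine col length (rayB board (board.length : Int) ((pyW board : Nat) : Int) 1 (-1)
        (board.length + pyW board + 1) 0 0)
      = if length = 1 ∧ (board.head?.bind List.head?) = some col then 1 else 0 := by
  cases board with
  | nil =>
    rw [rayB_out _ _ _ _ _ _ _ _ (by simp)]
    simp [countLine, countLineGo_nil]
  | cons row0 rows =>
    have hp0 : PySem.List.pyGet? (row0 :: rows) 0 = some row0 := PySem.List.pyGet?_zero_cons _ _
    have hpw : pyW (row0 :: rows) = row0.length := by simp [pyW, hp0]
    cases row0 with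
    | nil =>
      rw [rayB_out _ _ _ _ _ _ _ _ (by simp [hpw])]
      simp [countLine, countLineGo_nil]
    | cons c0 cs =>
      have hcell : cellB ((c0 :: cs) :: rows) 0 0 = c0 := by
        simp [cellB, PySem.List.pyGet?_zero_cons]
      have hgu : (0 : Int) ≤ 0 ∧ (0 : Int) < ((((c0 :: cs) :: rows).length : Nat) : Int)
          ∧ (0 : Int) ≤ 0 ∧ (0 : Int) < ((pyW ((c0 :: cs) :: rows) : Nat) : Int) := by
        refine ⟨le_refl _, by push_cast [List.length_cons]; omega, le_refl _, by rw [hpw]; push_cast [List.length_cons]; omega⟩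
      simp only [rayB]
      rw [if_pos hgu]
      rw [rayB_out _ _ _ _ _ _ _ _ (by omega)]
      rw [hcell]
      by_cases hc : c0 = col
      · have hb : (c0 == col) = true := by simp [hc]
        simp only [countLine, List.length_cons, List.length_nil, Nat.zero_add, countLineGo, hb,
          if_true, List.takeWhile_cons, List.takeWhile_nil, List.dropWhile_cons,
          List.dropWhile_nil, countLineGo_nil, hc]
        by_cases hL : length = 1
        · simp [hL]
        · have h1 : ¬ (1 : Int) = length := fun h => hL h.symm
          simp [h1, hL]
      · have hb : (c0 == col) = false := by simp [hc]
        simp only [countLine, List.length_cons, List.length_nil, countLineGo, hb,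
          Bool.false_eq_true, if_false, countLineGo_nil]
        rw [if_neg (by simp [hc])]

-- ===== VERDICT (by name: the statement is the Claim_ definition above) =====
theorem detect_closeds_spec : Claim_unchanged_detect_closeds := by
  intro board col length hDom hPre
  unfold Pre_detect_closeds at hPre
  unfold Spec_detect_closeds
  intro hD
  have hl : length ≠ 0 := hPre.2.2
  have halt := alt_eq board col length hl
  rw [k_val] at halt
  unfold D_detect_closeds at hD
  rw [if_neg hD] at halt
  omega

theorem detect_closeds_changed : Claim_changed_detect_closeds := by
  unfold Claim_changed_detect_closeds; decide

theorem detect_closeds_tight : Claim_exact_detect_closeds := by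
  intro board col length hDom hPre hD
  unfold Pre_detect_closeds at hPre
  have hl : length ≠ 0 := hPre.2.2
  have halt := alt_eq board col length hl
  rw [k_val] at halt
  unfold D_detect_closeds at hD
  rw [if_pos hD] at halt
  omega
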